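-- pv_equiv track=rewrite | github.com/yamins81/thor_model_exploration | thor_model_exploration/model_exploration_params.py | trans_fn
-- ===== SOURCE A (Python) =====
-- def trans_fn(x):
--     tdict = {'a': 'activ', 'p': 'lpool', 'n': 'lnorm'}
--     ord = [[]]
--     cur = 0
--     for y in x:
--         if y == '|':
--             cur += 1
--             ord.append([])
--         else:
--             ord[cur].append(tdict[y])
--     return ord
-- ===== SOURCE B (Python) =====
-- def trans_fn(x):
--     tdict = {'a': 'activ', 'p': 'lpool', 'n': 'lnorm'}
--     return [[tdict[c] for c in seg] for seg in x.split('|')]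
-- ===== Notes on version B (the rewrite author's own statement) =====
-- stated objective: idiomatic
-- what changed: B splits the string on '|' in a separate pass and then maps each segment's characters through the dict with a nested comprehension, instead of scanning char-by-char while maintaining a mutable segment counter and appending in place.
import Mathlib
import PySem

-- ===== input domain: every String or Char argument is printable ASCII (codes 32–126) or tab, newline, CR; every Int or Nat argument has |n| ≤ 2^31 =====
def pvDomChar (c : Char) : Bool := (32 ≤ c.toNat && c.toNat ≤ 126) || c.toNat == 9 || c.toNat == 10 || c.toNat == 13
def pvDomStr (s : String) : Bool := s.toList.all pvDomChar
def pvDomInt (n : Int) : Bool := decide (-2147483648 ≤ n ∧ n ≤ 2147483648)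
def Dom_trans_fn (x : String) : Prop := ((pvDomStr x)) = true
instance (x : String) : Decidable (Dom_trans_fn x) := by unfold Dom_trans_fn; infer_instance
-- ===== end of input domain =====

-- B replaces A's char-by-char scan with a mutable segment counter by a split-on-'|' pass
-- followed by a nested map through the dict (idiomatic; same O(n) cost).


-- ===== PORT A =====
-- tdict = {'a': 'activ', 'p': 'lpool', 'n': 'lnorm'}
def tdictA : PySem.Dict Char String :=
  PySem.Dict.ofList [('a', "activ"), ('p', "lpool"), ('n', "lnorm")]

-- one loop step: state = (ord, cur); Python's ord[cur].append(tdict[y]) is List.modify at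
-- index cur (cur is always in range; tdict[y] on a key outside the dict raises KeyError in
-- Python — those inputs are excluded by Pre_trans_fn, the port uses getD there)
def stepA (s : List (List String) × Nat) (y : Char) : List (List String) × Nat :=
  if y = '|' then (s.1 ++ [[]], s.2 + 1)
  else (s.1.modify s.2 (· ++ [tdictA.getD y ""]), s.2)

def trans_fn (x : String) : List (List String) :=
  (x.toList.foldl stepA ([[]], 0)).1

-- ===== PORT B =====
def tdictB : PySem.Dict Char String :=
  PySem.Dict.ofList [('a', "activ"), ('p', "lpool"), ('n', "lnorm")]

-- [[tdict[c] for c in seg] for seg in x.split('|')]  (split? is some for the nonempty sep "|";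
-- tdict[c] on a missing key raises KeyError in Python — excluded by Pre_trans_fn, port uses getD)
def trans_fn_alt (x : String) : List (List String) :=
  ((PySem.Str.split? x "|").getD []).map (fun seg => seg.toList.map (fun c => tdictB.getD c ""))

-- ===== PRECONDITION & SPEC =====
-- Pre_ excludes exactly the inputs containing a character other than 'a','p','n','|',
-- on which Python's tdict[y] raises KeyError.
def Pre_trans_fn (x : String) : Prop :=
  x.toList.all (fun c => c == 'a' || c == 'p' || c == 'n' || c == '|') = true
instance (x : String) : Decidable (Pre_trans_fn x) := by unfold Pre_trans_fn; infer_instance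

def pvWitness_trans_fn : String := "a|pn||"

def Spec_trans_fn (x : String) (out : List (List String)) : Prop := out = trans_fn_alt x
instance (x : String) (out : List (List String)) : Decidable (Spec_trans_fn x out) := by unfold Spec_trans_fn; infer_instance

-- ===== CLAIM (what is proved, stated in full; the proofs are below) =====
def Claim_equal_trans_fn : Prop := ∀ (x : String), Dom_trans_fn x → Pre_trans_fn x → Spec_trans_fn x (trans_fn x)

-- ===== LEMMAS AND PROOFS =====

-- the common recursive shape: split a char list on '|' into segments
def split0 : List Char → List (List Char)
  | [] => [[]]
  | c :: cs => if c = '|' then [] :: split0 cs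
               else match split0 cs with
                    | [] => [[c]]
                    | h :: t => (c :: h) :: t

theorem split0_ne_nil (cs : List Char) : split0 cs ≠ [] := by
  cases cs with
  | nil => simp [split0]
  | cons c cs =>
    simp only [split0]
    split_ifs
    · simp
    · split <;> simp

-- prepend a prefix onto the first segment
def pf (pre : List Char) : List (List Char) → List (List Char)
  | [] => [pre]
  | h :: t => (pre ++ h) :: t

theorem modify_append_length (l : List (List String)) (a : List String)
    (f : List String → List String) : (l ++ [a]).modify l.length f = l ++ [f a] := by
  induction l with
  | nil => rfl
  | cons h t ih => simpa [List.modify] using ih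

-- splitOn.go with enough fuel computes split0 (single-char separator '|')
theorem go_eq_split0 (l : List Char) : ∀ (fuel : Nat) (cur : List Char) (acc : List (List Char)),
    l.length ≤ fuel →
    PySem.Chars.splitOn.go ['|'] fuel l cur acc = acc.reverse ++ pf cur.reverse (split0 l) := by
  induction l with
  | nil =>
    intro fuel cur acc _
    cases fuel <;> simp [PySem.Chars.splitOn.go, split0, pf]
  | cons c cs ih =>
    intro fuel cur acc hf
    cases fuel with
    | zero => simp at hf
    | succ f =>
      by_cases hc : c = '|'
      · subst hc
        have hpre : List.isPrefixOf ['|'] ('|' :: cs) = true := by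
          simp [List.isPrefixOf]
        rw [PySem.Chars.splitOn.go]
        simp only [hpre, if_true]
        rw [show List.drop ['|'].length ('|' :: cs) = cs from rfl]
        rw [ih f [] (cur.reverse :: acc) (by simpa using hf)]
        obtain ⟨h, t, heq⟩ : ∃ h t, split0 cs = h :: t := by
          cases h : split0 cs with
          | nil => exact absurd h (split0_ne_nil cs)
          | cons a b => exact ⟨a, b, rfl⟩
        simp [split0, pf, heq]
      · have hpre : List.isPrefixOf ['|'] (c :: cs) = false := by
          simp only [List.isPrefixOf, Bool.and_eq_false_iff, beq_eq_false_iff_ne, ne_eq]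
          exact Or.inl fun h => hc h.symm
        rw [PySem.Chars.splitOn.go]
        simp only [hpre]
        rw [if_neg (by simp)]
        rw [ih f (c :: cur) acc (by simpa using Nat.le_of_succ_le_succ hf)]
        obtain ⟨h, t, heq⟩ : ∃ h t, split0 cs = h :: t := by
          cases h : split0 cs with
          | nil => exact absurd h (split0_ne_nil cs)
          | cons a b => exact ⟨a, b, rfl⟩
        simp [split0, pf, heq, hc]

theorem splitOn_eq_split0 (l : List Char) :
    PySem.Chars.splitOn l ['|'] = split0 l := by
  rw [PySem.Chars.splitOn, go_eq_split0 l (l.length + 1) [] [] (by omega)]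
  obtain ⟨h, t, heq⟩ : ∃ h t, split0 l = h :: t := by
    cases h : split0 l with
    | nil => exact absurd h (split0_ne_nil l)
    | cons a b => exact ⟨a, b, rfl⟩
  simp [pf, heq]

-- the lookup function (shared value of both dict lookups)
def tl (c : Char) : String := tdictA.getD c ""

theorem tdictB_getD_eq (c : Char) : tdictB.getD c "" = tl c := rfl

-- prepend (as Strings) onto the first segment of the mapped split
def pfS (pre : List String) : List (List String) → List (List String)
  | [] => [pre]
  | h :: t => (pre ++ h) :: t

-- the A-side loop invariant
theorem foldl_stepA (cs : List Char) :
    ∀ (ord₀ : List (List String)) (last : List String),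
    (cs.foldl stepA (ord₀ ++ [last], ord₀.length)).1
      = ord₀ ++ pfS last ((split0 cs).map (List.map tl)) := by
  induction cs with
  | nil => intro ord₀ last; simp [split0, pfS]
  | cons c cs ih =>
    intro ord₀ last
    obtain ⟨h, t, heq⟩ : ∃ h t, split0 cs = h :: t := by
      cases h : split0 cs with
      | nil => exact absurd h (split0_ne_nil cs)
      | cons a b => exact ⟨a, b, rfl⟩
    by_cases hc : c = '|'
    · subst hc
      simp only [List.foldl_cons, stepA, if_true]
      rw [show (ord₀ ++ [last] ++ [([] : List String)], ord₀.length + 1)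
            = ((ord₀ ++ [last]) ++ [[]], (ord₀ ++ [last]).length) by simp]
      rw [ih (ord₀ ++ [last]) []]
      simp [split0, pfS, heq]
    · simp only [List.foldl_cons, stepA, if_neg hc]
      rw [modify_append_length]
      rw [show tdictA.getD c "" = tl c from rfl]
      rw [ih ord₀ (last ++ [tl c])]
      simp [split0, pfS, heq, hc]

theorem trans_fn_eq (x : String) :
    trans_fn x = (split0 x.toList).map (List.map tl) := by
  have h0 := foldl_stepA x.toList [] []
  rw [trans_fn,
    show (([[]], 0) : List (List String) × Nat)
      = (([] : List (List String)) ++ [[]], ([] : List (List String)).length) from rfl, h0]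
  obtain ⟨h, t, heq⟩ : ∃ h t, split0 x.toList = h :: t := by
    cases h : split0 x.toList with
    | nil => exact absurd h (split0_ne_nil x.toList)
    | cons a b => exact ⟨a, b, rfl⟩
  simp [pfS, heq]

theorem trans_fn_alt_eq (x : String) :
    trans_fn_alt x = (split0 x.toList).map (List.map tl) := by
  rw [trans_fn_alt, PySem.Str.split?, PySem.Chars.split?]
  simp [List.map_map]
  rw [splitOn_eq_split0]
  apply List.map_congr_left
  intro seg _
  simp [Function.comp]
  exact fun a _ => tdictB_getD_eq a

-- ===== VERDICT (by name: the statement is the Claim_ definition above) =====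
theorem trans_fn_spec : Claim_equal_trans_fn := by
  intro x _ _
  show trans_fn x = trans_fn_alt x
  rw [trans_fn_eq, trans_fn_alt_eq]
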